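-- pv_equiv track=rewrite | github.com/YacineCC/UNI | L2/I43/V/TP3/ex4.py | sous_chaines
-- ===== SOURCE A (Python) =====
-- def pgcd(a,n):
--
-- 	while n != 0:
-- 		a,n = n,a%n
-- 	return a
--
-- def trigrammes(texte):
-- 	big = []
-- 	i = 0
-- 	while(i < len(texte)-2):
-- 		ch = ""
-- 		for k in range (3):
-- 			ch += texte[i+k]
-- 		big += [ch]
-- 		i += 1
-- 	return big
--
-- def freqtri(texte):
-- 	big = trigrammes(texte)
-- 	freq = {}
-- 	for i in range(len(big)):
-- 		freq[big[i]] = 0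
--
-- 	freqtrimaxi = freq[big[0]]
-- 	trimaxi = big[0]
--
-- 	for j in range(len(big)):
-- 		if(big[j] in freq.keys()):
-- 			freq[big[j]] += 1
-- 			if freq[big[j]] > freqtrimaxi:
-- 				freqtrimaxi = freq[big[j]]
-- 				trimaxi = big[j]
--
-- 	return trimaxi,freqtrimaxi
--
-- def distfreqtrimax(texte):
-- 	tab = []
-- 	trimaxi = freqtri(texte)[0]
-- 	big = trigrammes(texte)
-- 	i = 0
-- 	k = 0
--     #on cherche d'abord la premiere occurence du trigramme maximal
-- 	while(big[i] != trimaxi):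
-- 		i += 1
-- 	#puis on incremente k et on le rentre dans le tab de sorti et on remet k a 0
-- 	while(i < len(big)):
-- 		if(big[i] == trimaxi):
-- 			tab += [k]
-- 			k = 0
-- 		k += 1
-- 		i += 1
--
-- 	return tab
--
-- def lencle(texte):
--
-- 	tab = distfreqtrimax(texte)
--
-- 	i = 1
-- 	pgcdi = tab[0]
-- 	n = len(tab)
--     #on fait le pgcd de tous les elements du tableau
-- 	while(i < n):
-- 		pgcdi = pgcd(tab[i],pgcdi)
-- 		i += 1
-- 	return pgcdi
--
-- def sous_chaines(texte):
-- 	lcle = lencle(texte)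
-- 	tab = []
-- 	k = 0
-- 	while k < lcle:
-- 			ch = ""
-- 			for i in range(0,len(texte)-lcle,lcle):
-- 				ch += texte[i+k]
--
-- 			tab += [ch]
-- 			k += 1
-- 	return tab
-- ===== SOURCE B (Python) =====
-- from math import gcd
-- from functools import reduce
--
--
-- def sous_chaines(texte):
--     n = len(texte)
--     trigs = [texte[i:i + 3] for i in range(n - 2)]
--     # most frequent trigram, first-to-reach-the-count wins
--     counts = {}
--     best, bestc = trigs[0], 0
--     for t in trigs:
--         c = counts.get(t, 0) + 1
--         counts[t] = c
--         if c > bestc: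
--             best, bestc = t, c
--     # gcd of the gaps between consecutive occurrences of that trigram
--     pos = [i for i, t in enumerate(trigs) if t == best]
--     lcle = reduce(gcd, (b - a for a, b in zip(pos, pos[1:])), 0)
--     # one column per key position (empty result when the trigram never repeats)
--     return [texte[k:n - lcle + k:lcle] for k in range(lcle)]
-- ===== Notes on version B (the rewrite author's own statement) =====
-- stated objective: simpler
-- what changed: B replaces A's preset-dict double loop with a single counting scan (get-default dict) keeping the same first-to-strictly-exceed tie-break, replaces the two index-walking while loops with an enumerate/filter position list whose consecutive differences are reduced with math.gcd, and builds each column with a strided slice instead of a character-append loop.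
import Mathlib
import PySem

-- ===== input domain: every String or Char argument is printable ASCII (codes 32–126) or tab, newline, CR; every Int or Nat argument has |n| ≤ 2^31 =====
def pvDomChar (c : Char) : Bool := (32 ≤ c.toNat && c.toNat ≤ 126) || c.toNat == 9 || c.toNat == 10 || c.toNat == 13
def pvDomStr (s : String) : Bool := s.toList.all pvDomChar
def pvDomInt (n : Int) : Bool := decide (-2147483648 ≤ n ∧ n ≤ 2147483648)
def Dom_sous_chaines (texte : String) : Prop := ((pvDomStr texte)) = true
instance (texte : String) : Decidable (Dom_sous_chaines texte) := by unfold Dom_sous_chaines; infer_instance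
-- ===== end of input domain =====

-- B re-expresses each stage (trigram counting by a running counter dict, gaps from occurrence
-- positions, gcd by reduce, columns by strided slices); objective: simpler (timing run measured B faster by a constant factor).

-- ===== PORT A =====

-- termination fact for the literal port of pgcd's while loop (cited in decreasing_by)
theorem pvModAbsLt (a n : Int) (h : n ≠ 0) : (PySem.Int.mod a n).natAbs < n.natAbs := by
  rcases lt_or_gt_of_ne h with hn | hn
  · have h1 := PySem.Int.mod_neg_bounds a hn
    omega
  · have h1 := PySem.Int.mod_nonneg a hn
    have h2 := PySem.Int.mod_lt a hn
    omega

def pvA_pgcd (a n : Int) : Int :=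
  if h : n = 0 then a else pvA_pgcd n (PySem.Int.mod a n)
termination_by n.natAbs
decreasing_by exact pvModAbsLt a n h

-- ch = ""; for k in range(3): ch += texte[i+k]
def pvA_tri3 (cs : List Char) (i : Int) : List Char :=
  (PySem.List.pyRange 0 3 1).foldl (fun ch k => ch ++ [PySem.List.pyGetD cs (i + k) ' ']) []

-- while i < len(texte)-2: … big += [ch]; i += 1
def pvA_trigLoop (cs : List Char) (big : List (List Char)) (i : Nat) : List (List Char) :=
  if h : (i : Int) < (cs.length : Int) - 2 then
    pvA_trigLoop cs (big ++ [pvA_tri3 cs (i : Int)]) (i + 1)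
  else big
termination_by cs.length - i
decreasing_by omega

def pvA_trigrammes (cs : List Char) : List (List Char) := pvA_trigLoop cs [] 0

-- body of freqtri's second loop, on the element big[j]
def pvA_freqStepE (st : PySem.Dict (List Char) Int × Int × List Char) (t : List Char) :
    PySem.Dict (List Char) Int × Int × List Char :=
  if st.1.contains t then
    let d := st.1.modify t 0 (· + 1)
    let c := d.getD t 0
    if st.2.1 < c then (d, c, t) else (d, st.2.1, st.2.2)
  else st

-- freqtri; none = the IndexError Python raises at big[0] when len(texte) < 3
def pvA_freqtri (big : List (List Char)) : Option (List Char × Int) :=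
  match PySem.List.pyGet? big 0 with
  | none => none
  | some b0 =>
    let freq := (PySem.List.pyRange 0 (big.length : Int) 1).foldl
      (fun d i => d.insert (PySem.List.pyGetD big i []) 0) PySem.Dict.empty
    let st := (PySem.List.pyRange 0 (big.length : Int) 1).foldl
      (fun st j => pvA_freqStepE st (PySem.List.pyGetD big j [])) (freq, freq.getD b0 0, b0)
    some (st.2.2, st.2.1)

-- while big[i] != trimaxi: i += 1   (none = IndexError past the end)
def pvA_findLoop (big : List (List Char)) (t : List Char) (i : Nat) : Option Nat :=
  match h : PySem.List.pyGet? big (i : Int) with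
  | none => none
  | some x => if x ≠ t then pvA_findLoop big t (i + 1) else some i
termination_by big.length - i
decreasing_by
  rw [PySem.List.pyGet?_natCast] at h
  obtain ⟨hi, -⟩ := List.getElem?_eq_some_iff.mp h
  omega

-- while i < len(big): if big[i] == trimaxi: tab += [k]; k = 0;  k += 1; i += 1
def pvA_tabLoop (big : List (List Char)) (t : List Char) (i : Nat) (k : Int) : List Int :=
  if h : i < big.length then
    if PySem.List.pyGetD big (i : Int) [] = t then
      k :: pvA_tabLoop big t (i + 1) 1
    else pvA_tabLoop big t (i + 1) (k + 1)
  else []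
termination_by big.length - i
decreasing_by all_goals omega

def pvA_distfreqtrimax (cs : List Char) : Option (List Int) :=
  match pvA_freqtri (pvA_trigrammes cs) with
  | none => none
  | some tm =>
    let big := pvA_trigrammes cs
    match pvA_findLoop big tm.1 0 with
    | none => none
    | some i => some (pvA_tabLoop big tm.1 i 0)

def pvA_lencle (cs : List Char) : Option Int :=
  match pvA_distfreqtrimax cs with
  | none => none
  | some tab =>
    some ((PySem.List.pyRange 1 (tab.length : Int) 1).foldl
      (fun pgcdi i => pvA_pgcd (PySem.List.pyGetD tab i 0) pgcdi)
      (PySem.List.pyGetD tab 0 0))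

-- while k < lcle: ch = ""; for i in range(0, len(texte)-lcle, lcle): ch += texte[i+k]; tab += [ch]; k += 1
def pvA_colLoop (cs : List Char) (lcle : Int) (tab : List String) (k : Int) : List String :=
  if h : k < lcle then
    let ch := (PySem.List.pyRange 0 ((cs.length : Int) - lcle) lcle).foldl
      (fun ch i => ch ++ [PySem.List.pyGetD cs (i + k) ' ']) []
    pvA_colLoop cs lcle (tab ++ [String.ofList ch]) (k + 1)
  else tab
termination_by (lcle - k).toNat
decreasing_by omega

def sous_chaines (texte : String) : List String :=
  match pvA_lencle texte.toList with
  | none => []   -- unreachable under Pre_ (len ≥ 3): Python raises IndexError there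
  | some lcle => pvA_colLoop texte.toList lcle [] 0

-- ===== PORT B =====

-- one step of the counting scan: counts[t] = counts.get(t,0)+1; update (best, bestc)
def pvB_scanStep (st : PySem.Dict (List Char) Int × List Char × Int) (t : List Char) :
    PySem.Dict (List Char) Int × List Char × Int :=
  let c := st.1.getD t 0 + 1
  if st.2.2 < c then (st.1.insert t c, t, c) else (st.1.insert t c, st.2)

def sous_chaines_alt (texte : String) : List String :=
  let cs := texte.toList
  let n : Int := (cs.length : Int)
  let trigs := (PySem.List.pyRange 0 (n - 2) 1).map
    (fun i => PySem.List.slice cs (some i) (some (i + 3)))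
  match PySem.List.pyGet? trigs 0 with
  | none => []   -- Python: trigs[0] raises IndexError when len(texte) < 3
  | some t0 =>
    let best := (trigs.foldl pvB_scanStep (PySem.Dict.empty, t0, 0)).2.1
    let pos := ((PySem.List.enumerate trigs 0).filter (fun p => p.2 == best)).map (·.1)
    let lcle := (pos.zip pos.tail).foldl (fun g p => ((Int.gcd g (p.2 - p.1) : Nat) : Int)) 0
    (PySem.List.pyRange 0 lcle 1).map (fun k =>
      String.ofList ((PySem.List.slice? cs (some k) (some (n - lcle + k)) lcle).getD []))

-- ===== PRECONDITION & SPEC =====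
-- Pre_: Python raises IndexError (big[0] / trigs[0]) when len(texte) < 3; A returns on every longer string.
def Pre_sous_chaines (texte : String) : Prop := 3 ≤ texte.toList.length
instance (texte : String) : Decidable (Pre_sous_chaines texte) := by unfold Pre_sous_chaines; infer_instance
def pvWitness_sous_chaines : String := "abcxabc"

def Spec_sous_chaines (texte : String) (out : List String) : Prop := out = sous_chaines_alt texte
instance (texte : String) (out : List String) : Decidable (Spec_sous_chaines texte out) := by unfold Spec_sous_chaines; infer_instance

-- ===== CLAIM (what is proved, stated in full; the proofs are below) =====
def Claim_equal_sous_chaines : Prop := ∀ (texte : String), Dom_sous_chaines texte → Pre_sous_chaines texte → Spec_sous_chaines texte (sous_chaines texte)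



-- ===== LEMMAS AND PROOFS =====

-- canonical trigram list
def pvTri (cs : List Char) (i : Nat) : List Char :=
  [cs.getD i ' ', cs.getD (i + 1) ' ', cs.getD (i + 2) ' ']

def pvTT (cs : List Char) : List (List Char) := (List.range (cs.length - 2)).map (pvTri cs)

-- positions (from offset s) at which t occurs
def pvOccL : List (List Char) → List Char → Nat → List Nat
  | [], _, _ => []
  | x :: xs, t, s => if x = t then s :: pvOccL xs t (s + 1) else pvOccL xs t (s + 1)

-- shape of A's tab-building loop as a function of the remaining occurrence positions
def pvTabOf : Nat → Int → List Nat → List Int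
  | _, _, [] => []
  | i, k, q :: qs => ((q : Int) - (i : Int) + k) :: pvTabOf (q + 1) 1 qs

-- the k-th column as A's inner loop computes it
def pvColA (cs : List Char) (lcle k : Int) : List Char :=
  (PySem.List.pyRange 0 ((cs.length : Int) - lcle) lcle).map
    (fun i => PySem.List.pyGetD cs (i + k) ' ')

theorem pv_occL_cons (x : List Char) (xs : List (List Char)) (t : List Char) (s : Nat) :
    pvOccL (x :: xs) t s = if x = t then s :: pvOccL xs t (s + 1) else pvOccL xs t (s + 1) := rfl

theorem pv_tri3_eq (cs : List Char) (i : Nat) : pvA_tri3 cs (i : Int) = pvTri cs i := by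
  have h3 : PySem.List.pyRange 0 3 1 = [0, 1, 2] := by decide
  have e1 : ((i : Int) + 1) = ((i + 1 : Nat) : Int) := by push_cast; ring
  have e2 : ((i : Int) + 2) = ((i + 2 : Nat) : Int) := by push_cast; ring
  unfold pvA_tri3 pvTri
  rw [h3]
  simp only [List.foldl_cons, List.foldl_nil, List.nil_append, add_zero, e1, e2,
    PySem.List.pyGetD_natCast]
  rfl

theorem pv_trigLoop_eq (cs : List Char) : ∀ (i : Nat) (big : List (List Char)),
    pvA_trigLoop cs big i = big ++ (List.range (cs.length - 2 - i)).map (fun j => pvTri cs (i + j)) := by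
  intro i big
  fun_induction pvA_trigLoop cs big i with
  | case1 big i h ih =>
    rw [ih]
    have hi : i < cs.length - 2 := by omega
    have hd : cs.length - 2 - i = (cs.length - 2 - (i + 1)) + 1 := by omega
    rw [hd, List.range_succ_eq_map, List.map_cons, List.map_map, List.append_assoc,
      List.singleton_append]
    congr 1
    congr 1
    · rw [pv_tri3_eq]
      norm_num
    · apply List.map_congr_left
      intro j hj
      simp only [Function.comp_apply]
      congr 1
      omega
  | case2 big i h =>
    have : cs.length - 2 - i = 0 := by omega
    simp [this]

theorem pv_trig_eq (cs : List Char) : pvA_trigrammes cs = pvTT cs := by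
  unfold pvA_trigrammes pvTT
  rw [pv_trigLoop_eq]
  simp

theorem pv_take3_eq (cs : List Char) (k : Nat) (hk : k + 2 < cs.length) :
    (cs.drop k).take 3 = pvTri cs k := by
  rw [List.drop_eq_getElem_cons (by omega : k < cs.length),
      List.drop_eq_getElem_cons (by omega : k + 1 < cs.length),
      List.drop_eq_getElem_cons (by omega : k + 2 < cs.length)]
  simp only [List.take_succ_cons, List.take_zero]
  unfold pvTri
  rw [List.getD_eq_getElem _ _ (by omega : k < cs.length),
    List.getD_eq_getElem _ _ (by omega : k + 1 < cs.length),
    List.getD_eq_getElem _ _ (by omega : k + 2 < cs.length)]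

theorem pv_trigB_eq (cs : List Char) :
    (PySem.List.pyRange 0 ((cs.length : Int) - 2) 1).map
      (fun i => PySem.List.slice cs (some i) (some (i + 3))) = pvTT cs := by
  rw [PySem.List.pyRange_one, List.map_map]
  have hlen : ((cs.length : Int) - 2 - 0).toNat = cs.length - 2 := by omega
  rw [hlen]
  unfold pvTT
  apply List.map_congr_left
  intro k hk
  rw [List.mem_range] at hk
  have e0 : ((0 : Int) + (k : Int)) = ((k : Nat) : Int) := by push_cast; ring
  have e3 : (((k : Nat) : Int) + 3) = (((k : Nat) : Int) + ((3 : Nat) : Int)) := by norm_num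
  simp only [Function.comp_apply, e0, e3, PySem.List.slice_natCast_add]
  exact pv_take3_eq cs k (by omega)

-- dict initialised with value 0 at every key
theorem pv_getD0_foldl (l : List (List Char)) :
    ∀ (d : PySem.Dict (List Char) Int), (∀ t, d.getD t 0 = 0) →
    ∀ t, (l.foldl (fun d x => d.insert x 0) d).getD t 0 = 0 := by
  induction l with
  | nil => intro d hd t; simpa using hd t
  | cons x xs ih =>
    intro d hd t
    simp only [List.foldl_cons]
    refine ih _ (fun t' => ?_) t
    rw [PySem.Dict.getD_insert]
    split <;> simp [hd]

theorem pv_contains_foldl_of (l : List (List Char)) :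
    ∀ (d : PySem.Dict (List Char) Int) (t : List Char), d.contains t = true →
    (l.foldl (fun d x => d.insert x 0) d).contains t = true := by
  induction l with
  | nil => intro d t h; simpa using h
  | cons x xs ih =>
    intro d t h
    simp only [List.foldl_cons]
    exact ih _ _ (by rw [PySem.Dict.contains_insert]; simp [h])

theorem pv_contains_foldl_mem (l : List (List Char)) :
    ∀ (d : PySem.Dict (List Char) Int) (t : List Char), t ∈ l →
    (l.foldl (fun d x => d.insert x 0) d).contains t = true := by
  induction l with
  | nil => intro d t h; simp at h
  | cons x xs ih =>
    intro d t h
    simp only [List.foldl_cons]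
    rcases List.mem_cons.mp h with h | h
    · subst h; exact pv_contains_foldl_of xs _ _ (PySem.Dict.contains_insert_self d t 0)
    · exact ih _ _ h

-- the two counting scans agree on the (best, count) pair they track
theorem pv_scan_eq : ∀ (r : List (List Char)) (dA dB : PySem.Dict (List Char) Int)
    (b : List Char) (c : Int),
    (∀ t, dA.getD t 0 = dB.getD t 0) → (∀ t ∈ r, dA.contains t = true) →
    (r.foldl pvA_freqStepE (dA, c, b)).2 = Prod.swap ((r.foldl pvB_scanStep (dB, b, c)).2) := by
  intro r
  induction r with
  | nil => intro dA dB b c h1 h2; simp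
  | cons t ts ih =>
    intro dA dB b c h1 h2
    have hct : dA.contains t = true := h2 t (List.mem_cons_self ..)
    have hca : (dA.modify t 0 (· + 1)).getD t 0 = dA.getD t 0 + 1 :=
      PySem.Dict.getD_modify_self dA t 0 (· + 1)
    have hcb : dB.getD t 0 + 1 = dA.getD t 0 + 1 := by rw [h1]
    simp only [List.foldl_cons, pvA_freqStepE, pvB_scanStep, hct, if_true, hca, ← hcb]
    have hgd : ∀ t', (dA.modify t 0 (· + 1)).getD t' 0 = (dB.insert t (dB.getD t 0 + 1)).getD t' 0 := by
      intro t'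
      rw [PySem.Dict.getD_modify, PySem.Dict.getD_insert]
      split
      · rw [h1]
      · exact h1 t'
    have hcd : ∀ t' ∈ ts, (dA.modify t 0 (· + 1)).contains t' = true := by
      intro t' ht'
      rw [PySem.Dict.contains_modify]
      simp [h2 t' (List.mem_cons_of_mem _ ht')]
    by_cases hlt : c < dB.getD t 0 + 1
    · simp only [hlt, if_true]
      exact ih _ _ _ _ hgd hcd
    · simp only [hlt, if_false]
      exact ih _ _ _ _ hgd hcd

theorem pv_scan_mem : ∀ (r : List (List Char)) (S : List (List Char))
    (dB : PySem.Dict (List Char) Int) (b : List Char) (c : Int),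
    b ∈ S → (∀ t ∈ r, t ∈ S) → (r.foldl pvB_scanStep (dB, b, c)).2.1 ∈ S := by
  intro r
  induction r with
  | nil => intro S dB b c hb _; simpa using hb
  | cons t ts ih =>
    intro S dB b c hb hr
    simp only [List.foldl_cons, pvB_scanStep]
    split
    · exact ih _ _ _ _ (hr t (List.mem_cons_self ..)) (fun x hx => hr x (List.mem_cons_of_mem _ hx))
    · exact ih _ _ _ _ hb (fun x hx => hr x (List.mem_cons_of_mem _ hx))

theorem pv_occ_lb : ∀ (xs : List (List Char)) (t : List Char) (s x : Nat),
    x ∈ pvOccL xs t s → s ≤ x := by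
  intro xs
  induction xs with
  | nil => intro t s x h; simp [pvOccL] at h
  | cons y ys ih =>
    intro t s x h
    rw [pv_occL_cons] at h
    split at h
    · rcases List.mem_cons.mp h with h | h
      · omega
      · have := ih t (s + 1) x h; omega
    · have := ih t (s + 1) x h; omega

theorem pv_occ_ub : ∀ (xs : List (List Char)) (t : List Char) (s x : Nat),
    x ∈ pvOccL xs t s → x < s + xs.length := by
  intro xs
  induction xs with
  | nil => intro t s x h; simp [pvOccL] at h
  | cons y ys ih =>
    intro t s x h
    rw [pv_occL_cons] at h
    split at h
    · rcases List.mem_cons.mp h with h | h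
      · simp [h]
      · have := ih t (s + 1) x h; simp; omega
    · have := ih t (s + 1) x h; simp; omega

theorem pv_occ_pairwise : ∀ (xs : List (List Char)) (t : List Char) (s : Nat),
    (pvOccL xs t s).Pairwise (· < ·) := by
  intro xs
  induction xs with
  | nil => intro t s; simp [pvOccL]
  | cons y ys ih =>
    intro t s
    rw [pv_occL_cons]
    split
    · exact List.pairwise_cons.mpr
        ⟨fun x hx => by have := pv_occ_lb ys t (s + 1) x hx; omega, ih t (s + 1)⟩
    · exact ih t (s + 1)

theorem pv_find_eq (big : List (List Char)) (t : List Char) : ∀ (i j : Nat),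
    pvA_findLoop big t i = some j →
    pvOccL (big.drop i) t i = pvOccL (big.drop j) t j ∧ j < big.length ∧ big.getD j [] = t := by
  intro i j
  fun_induction pvA_findLoop big t i with
  | case1 i h =>
    intro hj; simp at hj
  | case2 i x h hne ih =>
    intro hj
    rw [PySem.List.pyGet?_natCast] at h
    obtain ⟨hi, hx⟩ := List.getElem?_eq_some_iff.mp h
    obtain ⟨h1, h2, h3⟩ := ih hj
    refine ⟨?_, h2, h3⟩
    rw [List.drop_eq_getElem_cons hi, pv_occL_cons,
      if_neg (by intro hh; rw [hx] at hh; exact hne hh), h1]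
  | case3 i x h hne =>
    intro hj
    simp only [Option.some.injEq] at hj
    subst hj
    rw [PySem.List.pyGet?_natCast] at h
    obtain ⟨hi, hx⟩ := List.getElem?_eq_some_iff.mp h
    refine ⟨rfl, hi, ?_⟩
    rw [List.getD_eq_getElem _ _ hi, hx]
    exact not_not.mp hne

theorem pv_find_isSome (big : List (List Char)) (t : List Char) : ∀ (i : Nat),
    t ∈ big.drop i → (pvA_findLoop big t i).isSome := by
  intro i
  fun_induction pvA_findLoop big t i with
  | case1 i h =>
    intro hm
    rw [PySem.List.pyGet?_eq_none_iff] at h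
    have hge : big.length ≤ i := by
      by_contra hlt
      exact h ⟨by omega, by omega⟩
    rw [List.drop_of_length_le hge] at hm
    simp at hm
  | case2 i x h hne ih =>
    intro hm
    rw [PySem.List.pyGet?_natCast] at h
    obtain ⟨hi, hx⟩ := List.getElem?_eq_some_iff.mp h
    rw [List.drop_eq_getElem_cons hi] at hm
    rcases List.mem_cons.mp hm with hm | hm
    · exact absurd (hx.symm.trans hm.symm) hne
    · exact ih hm
  | case3 i x h hne =>
    intro _; simp

theorem pv_tab_eq (big : List (List Char)) (t : List Char) : ∀ (i : Nat) (k : Int),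
    pvA_tabLoop big t i k = pvTabOf i k (pvOccL (big.drop i) t i) := by
  intro i k
  fun_induction pvA_tabLoop big t i k with
  | case1 i k h heq ih =>
    rw [PySem.List.pyGetD_natCast] at heq
    rw [List.getD_eq_getElem _ _ h] at heq
    rw [List.drop_eq_getElem_cons h, pv_occL_cons, if_pos heq]
    unfold pvTabOf
    rw [ih]
    congr 1
    omega
  | case2 i k h heq ih =>
    rw [PySem.List.pyGetD_natCast] at heq
    rw [List.getD_eq_getElem _ _ h] at heq
    rw [List.drop_eq_getElem_cons h, pv_occL_cons, if_neg heq, ih]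
    generalize pvOccL (big.drop (i + 1)) t (i + 1) = l
    cases l with
    | nil => simp [pvTabOf]
    | cons q qs =>
      unfold pvTabOf
      congr 1
      push_cast
      ring
  | case3 i k h =>
    rw [List.drop_of_length_le (by omega)]
    simp [pvOccL, pvTabOf]

theorem pv_tabOf_diffs : ∀ (qs : List Nat) (q : Nat),
    pvTabOf (q + 1) 1 qs =
      (((q :: qs).map (fun (x : Nat) => (x : Int))).zip (qs.map (fun (x : Nat) => (x : Int)))).map
        (fun p => p.2 - p.1) := by
  intro qs
  induction qs with
  | nil => intro q; simp [pvTabOf]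
  | cons q2 qs2 ih =>
    intro q
    simp only [List.map_cons, List.zip_cons_cons, pvTabOf]
    rw [ih q2]
    congr 1
    push_cast
    ring

theorem pv_tabOf_pos : ∀ (qs : List Nat) (q : Nat), qs.Pairwise (· < ·) →
    (∀ x ∈ qs, q < x) → ∀ d ∈ pvTabOf (q + 1) 1 qs, 0 < d := by
  intro qs
  induction qs with
  | nil => intro q _ _ d hd; simp [pvTabOf] at hd
  | cons q2 qs2 ih =>
    intro q hpw hql d hd
    simp only [pvTabOf] at hd
    rcases List.mem_cons.mp hd with hd | hd
    · have hq : q < q2 := hql q2 (List.mem_cons_self ..)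
      subst hd
      push_cast
      omega
    · exact ih q2 (List.pairwise_cons.mp hpw).2
        (fun x hx => (List.pairwise_cons.mp hpw).1 x hx) d hd

theorem pv_posB_eq : ∀ (xs : List (List Char)) (t : List Char) (s : Nat),
    (((PySem.List.enumerate xs ((s : Nat) : Int)).filter (fun p => p.2 == t)).map (·.1)) =
      (pvOccL xs t s).map (fun (q : Nat) => (q : Int)) := by
  intro xs
  induction xs with
  | nil => intro t s; simp [PySem.List.enumerate_nil, pvOccL]
  | cons x xs ih =>
    intro t s
    rw [PySem.List.enumerate_cons, pv_occL_cons]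
    have e1 : ((s : Int) + 1) = ((s + 1 : Nat) : Int) := by push_cast; ring
    have hrec := ih t (s + 1)
    by_cases hx : x = t
    · simp only [List.filter_cons, hx, BEq.rfl, if_true, if_pos rfl, List.map_cons]
      rw [e1, hrec]
    · have hb : ((x == t) = false) := by simpa using hx
      simp only [List.filter_cons, hb, if_neg hx, Bool.false_eq_true, if_false]
      rw [e1, hrec]

theorem pv_pgcd_eq : ∀ (a n : Int), 0 ≤ a → 0 ≤ n →
    pvA_pgcd a n = ((Int.gcd a n : Nat) : Int) := by
  intro a n
  fun_induction pvA_pgcd a n with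
  | case1 a =>
    intro ha _
    rw [Int.gcd_zero_right, Int.natAbs_of_nonneg ha]
  | case2 a n h ih =>
    intro ha hn
    have hn' : 0 < n := lt_of_le_of_ne hn (Ne.symm h)
    have hm : PySem.Int.mod a n = a % n := PySem.Int.mod_eq_emod_of_pos hn'
    have hmn : 0 ≤ a % n := Int.emod_nonneg a (by omega)
    rw [ih hn (by rw [hm]; exact hmn)]
    congr 1
    rw [hm]
    obtain ⟨p, hp⟩ : ∃ p : Nat, a = (p : Int) := ⟨a.toNat, (Int.toNat_of_nonneg ha).symm⟩
    obtain ⟨q, hq⟩ : ∃ q : Nat, n = (q : Int) := ⟨n.toNat, (Int.toNat_of_nonneg hn).symm⟩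
    subst hp hq
    rw [← Int.natCast_mod, Int.gcd_natCast_natCast, Int.gcd_natCast_natCast,
      Nat.gcd_comm q (p % q), ← Nat.gcd_rec, Nat.gcd_comm]

theorem pv_gcdfold_eq : ∀ (l : List Int), (∀ d ∈ l, 0 ≤ d) → ∀ g, 0 ≤ g →
    l.foldl (fun g d => pvA_pgcd d g) g =
      l.foldl (fun g d => ((Int.gcd g d : Nat) : Int)) g := by
  intro l
  induction l with
  | nil => intro _ g _; rfl
  | cons d ds ih =>
    intro hl g hg
    simp only [List.foldl_cons]
    rw [pv_pgcd_eq d g (hl d (List.mem_cons_self ..)) hg, Int.gcd_comm]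
    exact ih (fun x hx => hl x (List.mem_cons_of_mem _ hx)) _ (by positivity)

theorem pv_gcdfold_nonneg : ∀ (l : List Int) (g : Int), 0 ≤ g →
    0 ≤ l.foldl (fun g d => ((Int.gcd g d : Nat) : Int)) g := by
  intro l
  induction l with
  | nil => intro g hg; simpa using hg
  | cons d ds ih => intro g hg; simp only [List.foldl_cons]; exact ih _ (by positivity)

theorem pv_gcdfold_le : ∀ (l : List Int) (g : Int), 0 < g →
    l.foldl (fun g d => ((Int.gcd g d : Nat) : Int)) g ≤ g := by
  intro l
  induction l with
  | nil => intro g hg; simp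
  | cons d ds ih =>
    intro g hg
    simp only [List.foldl_cons]
    have hgle : (Int.gcd g d : Int) ≤ g := by
      have h1 : Int.gcd g d ≤ g.natAbs := Nat.gcd_le_left _ (by omega)
      omega
    have hgpos : 0 < (Int.gcd g d : Int) := by
      have : ¬ (g = 0 ∧ d = 0) := by intro ⟨h, _⟩; omega
      have := Int.gcd_eq_zero_iff (a := g) (b := d)
      omega
    exact le_trans (ih _ hgpos) hgle

theorem pv_colLoop_eq (cs : List Char) (lcle : Int) : ∀ (tab : List String) (k : Int),
    pvA_colLoop cs lcle tab k =
      tab ++ (List.range (lcle - k).toNat).map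
        (fun (j : Nat) => String.ofList (pvColA cs lcle (k + (j : Int)))) := by
  intro tab k
  fun_induction pvA_colLoop cs lcle tab k with
  | case1 tab k h ch ih =>
    have hch : ch = pvColA cs lcle k := by
      rw [pvColA]
      exact (PySem.List.foldl_append_singleton_eq_map
        (fun i => PySem.List.pyGetD cs (i + k) ' ') _ []).trans (List.nil_append _)
    rw [ih, hch]
    have hd : (lcle - k).toNat = (lcle - (k + 1)).toNat + 1 := by omega
    rw [hd, List.range_succ_eq_map, List.map_cons, List.map_map, List.append_assoc,
      List.singleton_append]
    congr 1
    congr 1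
    · norm_num
    · apply List.map_congr_left
      intro j hj
      simp only [Function.comp_apply]
      congr 2
      push_cast
      ring
  | case2 tab k h =>
    have : (lcle - k).toNat = 0 := by omega
    simp [this]

theorem pv_filterMap_range (f : Nat → Option Char) (g : Nat → Char) (m : Nat)
    (h : ∀ x < m, f x = some (g x)) :
    (List.range m).filterMap f = (List.range m).map g :=
  List.filterMap_eq_map_iff_forall_eq_some.mpr (fun x hx => h x (List.mem_range.mp hx))

theorem pv_col_eq (cs : List Char) (lcle k : Int) (hl : 0 < lcle)
    (hn : lcle + 3 ≤ (cs.length : Int)) (hk0 : 0 ≤ k) (hk : k < lcle) :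
    pvColA cs lcle k =
      (PySem.List.slice? cs (some k) (some ((cs.length : Int) - lcle + k)) lcle).getD [] := by
  have hn0 : (3 : Int) ≤ (cs.length : Int) := by omega
  -- right-hand side: sliceIndices does not clamp here
  rw [PySem.List.slice?]
  rw [if_neg (by omega : ¬ lcle = 0)]
  rw [PySem.List.sliceIndices]
  simp only [if_neg (by omega : ¬ lcle < 0)]
  have hstart : (if k < 0 then max (k + (cs.length : Int)) 0 else min k (cs.length : Int)) = k := by
    rw [if_neg (by omega)]; omega
  have hstop : (if (cs.length : Int) - lcle + k < 0 then max ((cs.length : Int) - lcle + k + (cs.length : Int)) 0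
      else min ((cs.length : Int) - lcle + k) (cs.length : Int)) = (cs.length : Int) - lcle + k := by
    rw [if_neg (by omega)]; omega
  rw [hstart, hstop]
  simp only [if_pos hl, if_pos (by omega : k < (cs.length : Int) - lcle + k)]
  -- left-hand side: the strided range
  rw [pvColA, PySem.List.pyRange_of_pos 0 ((cs.length : Int) - lcle) hl,
    if_pos (by omega : (0 : Int) < (cs.length : Int) - lcle), List.map_map]
  have hc1 : ((cs.length : Int) - lcle + k - k + lcle - 1) = (cs.length : Int) - 1 := by ring
  have hc2 : ((cs.length : Int) - lcle - 0 + lcle - 1) = (cs.length : Int) - 1 := by ring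
  rw [hc1, hc2]
  have hdm := Int.ediv_add_emod ((cs.length : Int) - 1) lcle
  have hr0 : 0 ≤ ((cs.length : Int) - 1) % lcle := Int.emod_nonneg _ (by omega)
  have hrl : ((cs.length : Int) - 1) % lcle < lcle := Int.emod_lt_of_pos _ hl
  set q : Int := ((cs.length : Int) - 1) / lcle with hq
  have hq0 : 0 ≤ q := Int.ediv_nonneg (by omega) (by omega)
  -- every visited index is in range
  have hidx : ∀ x : Nat, x < q.toNat → (k + lcle * (x : Int)).toNat < cs.length ∧
      (0 + lcle * (x : Int) + k) = (k + lcle * (x : Int)) ∧ 0 ≤ k + lcle * (x : Int) := by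
    intro x hx
    have hx' : (x : Int) ≤ q - 1 := by omega
    have hmul : lcle * (x : Int) ≤ lcle * (q - 1) := mul_le_mul_of_nonneg_left hx' (by omega)
    have hmul2 : lcle * (q - 1) = lcle * q - lcle := by ring
    have h1 : 0 ≤ lcle * (x : Int) := by positivity
    refine ⟨by omega, by ring, by omega⟩
  rw [Option.getD_some]
  rw [pv_filterMap_range (fun x => cs[(k + lcle * (x : Int)).toNat]?)
    (fun x => PySem.List.pyGetD cs (0 + lcle * (x : Int) + k) ' ') q.toNat ?_]
  · apply List.map_congr_left
    intro x hx
    simp only [Function.comp_apply]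
  · intro x hx
    obtain ⟨h1, h2, h3⟩ := hidx x hx
    show cs[(k + lcle * (x : Int)).toNat]? = some (PySem.List.pyGetD cs (0 + lcle * (x : Int) + k) ' ')
    rw [List.getElem?_eq_getElem h1]
    congr 1
    rw [PySem.List.pyGetD_eq_getElem cs ' ' (by omega) (by omega : (0 + lcle * (x : Int) + k) < (cs.length : Int))]
    congr 1
    omega

-- ===== VERDICT (by name: the statement is the Claim_ definition above) =====
theorem sous_chaines_spec : Claim_equal_sous_chaines := by
  intro texte _ hpre
  unfold Spec_sous_chaines
  unfold Pre_sous_chaines at hpre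
  set cs := texte.toList with hcs
  have hTA : pvA_trigrammes cs = pvTT cs := pv_trig_eq cs
  have hTB := pv_trigB_eq cs
  have hTTlen : (pvTT cs).length = cs.length - 2 := by simp [pvTT]
  have hTTne : pvTT cs ≠ [] := by
    intro h
    have := congrArg List.length h
    rw [hTTlen] at this
    simp at this
    omega
  obtain ⟨t0, tt, hTT⟩ := List.exists_cons_of_ne_nil hTTne
  have hget : PySem.List.pyGet? (pvTT cs) 0 = some t0 := by
    rw [hTT, show (0 : Int) = ((0 : Nat) : Int) from rfl, PySem.List.pyGet?_natCast]
    rfl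
  -- A's frequency stage equals B's scan
  have hfold1 : (PySem.List.pyRange 0 ((pvTT cs).length : Int) 1).foldl
      (fun (d : PySem.Dict (List Char) Int) i => d.insert (PySem.List.pyGetD (pvTT cs) i []) 0)
        PySem.Dict.empty
      = (pvTT cs).foldl (fun (d : PySem.Dict (List Char) Int) t => d.insert t 0)
        PySem.Dict.empty :=
    PySem.List.foldl_pyRange_zero_pyGetD' (pvTT cs) []
      (fun (d : PySem.Dict (List Char) Int) t => d.insert t 0) _
  set D0 := (pvTT cs).foldl (fun (d : PySem.Dict (List Char) Int) t => d.insert t 0) PySem.Dict.empty with hD0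
  have hD0g : ∀ t, D0.getD t 0 = 0 :=
    pv_getD0_foldl (pvTT cs) PySem.Dict.empty (fun t => PySem.Dict.getD_empty t 0)
  have hD0c : ∀ t ∈ pvTT cs, D0.contains t = true :=
    fun t ht => pv_contains_foldl_mem (pvTT cs) _ t ht
  set stB := (pvTT cs).foldl pvB_scanStep (PySem.Dict.empty, t0, 0) with hstB
  set best := stB.2.1 with hbestdef
  have hscan := pv_scan_eq (pvTT cs) D0 PySem.Dict.empty t0 0
    (fun t => by rw [hD0g t, PySem.Dict.getD_empty]) hD0c
  have hscan1 : ((pvTT cs).foldl pvA_freqStepE (D0, 0, t0)).2.2 = best := by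
    rw [hscan, ← hstB]; rfl
  have hscan2 : ((pvTT cs).foldl pvA_freqStepE (D0, 0, t0)).2.1 = stB.2.2 := by
    rw [hscan, ← hstB]; rfl
  have hfreq : pvA_freqtri (pvTT cs) = some (best, stB.2.2) := by
    simp only [pvA_freqtri, hget]
    rw [PySem.List.foldl_pyRange_zero_pyGetD' (pvTT cs) []
      (fun st t => pvA_freqStepE st t) _]
    rw [show (fun (st : PySem.Dict (List Char) Int × Int × List Char) (t : List Char) =>
      pvA_freqStepE st t) = pvA_freqStepE from rfl]
    rw [hfold1, hD0g t0, hscan1, hscan2]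
  have hbmem : best ∈ pvTT cs :=
    pv_scan_mem (pvTT cs) (pvTT cs) PySem.Dict.empty t0 0
      (by rw [hTT]; exact List.mem_cons_self ..) (fun t ht => ht)
  -- A finds the first occurrence of best
  obtain ⟨j, hj⟩ := Option.isSome_iff_exists.mp
    (pv_find_isSome (pvTT cs) best 0 (by simpa using hbmem))
  obtain ⟨hocc0, hjlen, hjval⟩ := pv_find_eq (pvTT cs) best 0 j hj
  have hjval' : (pvTT cs)[j] = best := by
    rw [List.getD_eq_getElem _ _ hjlen] at hjval; exact hjval
  set qs := pvOccL ((pvTT cs).drop (j + 1)) best (j + 1) with hqs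
  have hoccj : pvOccL ((pvTT cs).drop j) best j = j :: qs := by
    rw [List.drop_eq_getElem_cons hjlen, pv_occL_cons, if_pos hjval', hqs]
  have hocc0' : pvOccL (pvTT cs) best 0 = j :: qs := by
    have h0 := hocc0
    rw [List.drop_zero] at h0
    rw [h0, hoccj]
  set rest := pvTabOf (j + 1) 1 qs with hrest
  have htab : pvA_tabLoop (pvTT cs) best j 0 = (0 : Int) :: rest := by
    rw [pv_tab_eq, hoccj]
    simp only [pvTabOf]
    rw [← hrest]
    congr 1
    omega
  have hdist : pvA_distfreqtrimax cs = some ((0 : Int) :: rest) := by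
    simp only [pvA_distfreqtrimax, hTA, hfreq, hj, htab]
  -- facts about the occurrence gaps
  have hposall : ∀ x ∈ qs, j < x := by
    intro x hx
    have := pv_occ_lb _ best (j + 1) x (by rw [← hqs]; exact hx)
    omega
  have hqpw : qs.Pairwise (· < ·) := by
    have h1 := pv_occ_pairwise ((pvTT cs).drop j) best j
    rw [hoccj] at h1
    exact (List.pairwise_cons.mp h1).2
  have hrestpos : ∀ d ∈ rest, 0 < d := by
    rw [hrest]; exact pv_tabOf_pos qs j hqpw hposall
  have hrestnn : ∀ d ∈ rest, 0 ≤ d := fun d hd => le_of_lt (hrestpos d hd)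
  set L := rest.foldl (fun g d => ((Int.gcd g d : Nat) : Int)) 0 with hLdef
  have hLnn : 0 ≤ L := pv_gcdfold_nonneg rest 0 le_rfl
  have hlen : pvA_lencle cs = some L := by
    simp only [pvA_lencle, hdist]
    rw [PySem.List.foldl_pyRange_pyGetD' ((0 : Int) :: rest) 0 (fun g x => pvA_pgcd x g) _
      (by norm_num : (0 : Int) ≤ 1)]
    rw [PySem.List.pyGetD_zero_cons]
    show some ((((0 : Int) :: rest).drop (1 : Int).toNat).foldl (fun g x => pvA_pgcd x g) 0) = _
    simp only [Int.toNat_one, List.drop_one, List.tail_cons]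
    rw [pv_gcdfold_eq rest hrestnn 0 le_rfl, ← hLdef]
  -- B's position list
  have hposBeq : ((PySem.List.enumerate (pvTT cs) 0).filter (fun p => p.2 == best)).map (·.1)
      = (j :: qs).map (fun (q : Nat) => (q : Int)) := by
    rw [show (0 : Int) = ((0 : Nat) : Int) from rfl, pv_posB_eq, hocc0']
  -- B's gcd fold computes the same L
  have hBL : (((j :: qs).map (fun (q : Nat) => (q : Int))).zip
        (((j :: qs).map (fun (q : Nat) => (q : Int))).tail)).foldl
      (fun g p => ((Int.gcd g (p.2 - p.1) : Nat) : Int)) 0 = L := by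
    have htail : ((j :: qs).map (fun (q : Nat) => (q : Int))).tail
        = qs.map (fun (q : Nat) => (q : Int)) := by simp
    rw [htail]
    calc ((((j :: qs).map (fun (q : Nat) => (q : Int))).zip
          (qs.map (fun (q : Nat) => (q : Int)))).foldl
          (fun g p => ((Int.gcd g (p.2 - p.1) : Nat) : Int)) 0)
        = (((((j :: qs).map (fun (q : Nat) => (q : Int))).zip
          (qs.map (fun (q : Nat) => (q : Int)))).map (fun p => p.2 - p.1)).foldl
          (fun (g : Int) (d : Int) => ((Int.gcd g d : Nat) : Int)) 0) :=
        (List.foldl_map (f := fun p : Int × Int => p.2 - p.1)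
          (g := fun (g : Int) (d : Int) => ((Int.gcd g d : Nat) : Int))).symm
      _ = L := by rw [← pv_tabOf_diffs qs j, ← hrest, ← hLdef]
  -- the two column stages
  have hA : sous_chaines texte = pvA_colLoop cs L [] 0 := by
    simp only [sous_chaines, ← hcs, hlen]
  have hB : sous_chaines_alt texte
      = (PySem.List.pyRange 0 L 1).map (fun k =>
          String.ofList ((PySem.List.slice? cs (some k)
            (some ((cs.length : Int) - L + k)) L).getD [])) := by
    simp only [sous_chaines_alt, ← hcs, hTB, hget]
    rw [← hstB, ← hbestdef, hposBeq, hBL]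
  rw [hA, hB, pv_colLoop_eq]
  simp only [List.nil_append, sub_zero]
  by_cases hLpos : 0 < L
  · -- key length bound: L is at most the first gap, which is at most len - 3
    have hLle : L + 3 ≤ (cs.length : Int) := by
      cases hqscase : qs with
      | nil =>
        exfalso
        rw [hqscase] at hrest
        simp only [pvTabOf] at hrest
        rw [hrest] at hLdef
        simp at hLdef
        omega
      | cons q2 qs2 =>
        have hrest2 : rest = ((q2 : Int) - ((j + 1 : Nat) : Int) + 1) :: pvTabOf (q2 + 1) 1 qs2 := by
          rw [hrest, hqscase]
          rfl
        have hq2mem : q2 ∈ qs := by rw [hqscase]; exact List.mem_cons_self ..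
        have hq2ub : q2 < (j + 1) + ((pvTT cs).drop (j + 1)).length :=
          pv_occ_ub _ best (j + 1) q2 (by rw [← hqs]; exact hq2mem)
        rw [List.length_drop, hTTlen] at hq2ub
        have hq2j : j < q2 := hposall q2 hq2mem
        have hd1pos : 0 < (q2 : Int) - ((j + 1 : Nat) : Int) + 1 := by push_cast; omega
        have hL1 : L = (pvTabOf (q2 + 1) 1 qs2).foldl (fun g d => ((Int.gcd g d : Nat) : Int))
            ((Int.gcd 0 ((q2 : Int) - ((j + 1 : Nat) : Int) + 1) : Nat) : Int) := by
          rw [hLdef, hrest2]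
          rfl
        have hg0 : ((Int.gcd 0 ((q2 : Int) - ((j + 1 : Nat) : Int) + 1) : Nat) : Int)
            = (q2 : Int) - ((j + 1 : Nat) : Int) + 1 := by
          rw [Int.gcd_zero_left]
          omega
        rw [hg0] at hL1
        have hLle1 : L ≤ (q2 : Int) - ((j + 1 : Nat) : Int) + 1 := by
          rw [hL1]
          exact pv_gcdfold_le _ _ hd1pos
        push_cast at hLle1 hq2ub ⊢
        omega
    rw [PySem.List.pyRange_one 0 L, List.map_map]
    simp only [sub_zero]
    apply List.map_congr_left
    intro x hx
    rw [List.mem_range] at hx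
    have hxL : (0 : Int) + (x : Int) < L := by omega
    simp only [Function.comp_apply]
    exact congrArg String.ofList
      (pv_col_eq cs L ((0 : Int) + (x : Int)) hLpos hLle (by omega) hxL)
  · have hL0 : L = 0 := by omega
    rw [hL0]
    simp [PySem.List.pyRange_one_eq_nil le_rfl]
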